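-- pv_equiv track=rewrite | github.com/yixiliu617/AlphaGraph_new | backend/scripts/extractors/_quarterly_common.py | find_section_lines
-- ===== SOURCE A (Python) =====
-- def find_section_lines(
--     text: str,
--     anchor: str,
--     end_anchors: tuple[str, ...] = (),
-- ) -> list[str] | None:
--     """Slice `text` into lines from the line containing `anchor` up to (but
--     not including) the first line that contains any of `end_anchors`.
--     Returns None when `anchor` isn't found at all."""
--     lines = text.splitlines()
--     start = next((i for i, ln in enumerate(lines) if anchor in ln), None)
--     if start is None:
--         return None
--     end = len(lines)
--     for j in range(start + 1, len(lines)):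
--         if any(e in lines[j] for e in end_anchors):
--             end = j
--             break
--     return lines[start:end]
-- ===== SOURCE B (Python) =====
-- def find_section_lines(
--     text: str,
--     anchor: str,
--     end_anchors: tuple[str, ...] = (),
-- ) -> list[str] | None:
--     """Single stateful pass: skip lines until one contains `anchor`, then
--     collect lines until one contains any of `end_anchors`."""
--     acc = None
--     for line in text.splitlines():
--         if acc is None:
--             if anchor in line:
--                 acc = [line]
--         elif any(e in line for e in end_anchors):
--             break
--         else:
--             acc.append(line)
--     return acc
-- ===== Notes on version B (the rewrite author's own statement) =====
-- stated objective: simpler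
-- what changed: Replaces the three-phase index computation (find start index, scan an index range for the end index, then slice) by one stateful pass over the lines with an optional accumulator and an early break, with no indexing or slicing at all.
import Mathlib
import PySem

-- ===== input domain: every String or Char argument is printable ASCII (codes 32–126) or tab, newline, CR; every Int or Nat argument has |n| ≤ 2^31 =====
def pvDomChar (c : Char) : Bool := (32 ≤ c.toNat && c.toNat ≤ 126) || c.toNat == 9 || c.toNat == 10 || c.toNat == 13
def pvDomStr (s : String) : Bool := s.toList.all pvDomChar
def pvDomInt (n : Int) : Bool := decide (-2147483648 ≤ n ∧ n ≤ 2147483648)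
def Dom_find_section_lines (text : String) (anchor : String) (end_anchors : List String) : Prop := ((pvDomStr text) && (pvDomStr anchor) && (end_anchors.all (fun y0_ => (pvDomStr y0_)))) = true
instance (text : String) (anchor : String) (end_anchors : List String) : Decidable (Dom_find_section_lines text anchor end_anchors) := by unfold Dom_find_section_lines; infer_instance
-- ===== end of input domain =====

-- B replaces A's find-index / scan-index-range / slice pipeline by one stateful pass with an
-- optional accumulator and an early break (simpler: no indexing, no slicing); same results.

-- ===== PORT A =====
-- 'start = next((i for i, ln in enumerate(lines) if anchor in ln), None)': first index whose line contains anchor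
def fsA_start (anchor : String) : List String → Nat → Option Nat
  | [], _ => none
  | ln :: rest, i => if PySem.Str.isIn anchor ln then some i else fsA_start anchor rest (i + 1)

-- 'for j in range(start+1, len(lines)): if any(e in lines[j] ...): end = j; break' over the range list;
-- j is always in range, so pyGetD's default "" is never used (exact there)
def fsA_end (lines : List String) (end_anchors : List String) (dflt : Int) : List Int → Int
  | [] => dflt
  | j :: rest =>
    if end_anchors.any (fun e => PySem.Str.isIn e (PySem.List.pyGetD lines j "")) then j
    else fsA_end lines end_anchors dflt rest

def find_section_lines (text : String) (anchor : String) (end_anchors : List String) : Option (List String) :=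
  let lines := PySem.Str.splitlines text
  match fsA_start anchor lines 0 with
  | none => none
  | some start =>
      let e := fsA_end lines end_anchors (lines.length : Int)
                 (PySem.List.pyRange ((start : Int) + 1) (lines.length : Int) 1)
      some (PySem.List.slice lines (some (start : Int)) (some e))

-- ===== PORT B =====
-- the single for-loop of Source B: state 'acc : Option (List String)', break on an end anchor
def fsB_loop (anchor : String) (end_anchors : List String) (acc : Option (List String)) : List String → Option (List String)
  | [] => acc
  | ln :: rest =>
    match acc with
    | none =>
        if PySem.Str.isIn anchor ln then fsB_loop anchor end_anchors (some [ln]) rest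
        else fsB_loop anchor end_anchors none rest
    | some xs =>
        if end_anchors.any (fun e => PySem.Str.isIn e ln) then some xs
        else fsB_loop anchor end_anchors (some (xs ++ [ln])) rest

def find_section_lines_alt (text : String) (anchor : String) (end_anchors : List String) : Option (List String) :=
  fsB_loop anchor end_anchors none (PySem.Str.splitlines text)

-- ===== PRECONDITION & SPEC =====
def Spec_find_section_lines (text : String) (anchor : String) (end_anchors : List String) (out : Option (List String)) : Prop := out = find_section_lines_alt text anchor end_anchors
instance (text : String) (anchor : String) (end_anchors : List String) (out : Option (List String)) : Decidable (Spec_find_section_lines text anchor end_anchors out) := by unfold Spec_find_section_lines; infer_instance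

-- ===== CLAIM (what is proved, stated in full; the proofs are below) =====
def Claim_equal_find_section_lines : Prop := ∀ (text : String) (anchor : String) (end_anchors : List String), Dom_find_section_lines text anchor end_anchors → Spec_find_section_lines text anchor end_anchors (find_section_lines text anchor end_anchors)

-- ===== LEMMAS AND PROOFS =====

theorem fsA_start_eq (anchor : String) (lines : List String) (i : Nat) :
    fsA_start anchor lines i = (lines.findIdx? (fun ln => PySem.Str.isIn anchor ln)).map (i + ·) := by
  induction lines generalizing i with
  | nil => simp only [fsA_start, List.findIdx?_nil, Option.map_none]
  | cons ln rest ih =>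
    simp only [fsA_start, List.findIdx?_cons]
    by_cases h : PySem.Str.isIn anchor ln = true
    · rw [if_pos h, if_pos h]; simp only [Option.map_some, Nat.add_zero]
    · rw [if_neg h, if_neg h, ih]
      cases rest.findIdx? (fun ln => PySem.Str.isIn anchor ln) <;>
        simp only [Option.map_none, Option.map_some] <;> try (congr 1; omega)

-- aux: index (within xs) of the first stopping line, or xs.length
def fsAux (q : String → Bool) (xs : List String) : Nat :=
  match xs.findIdx? q with
  | some k => k
  | none => xs.length

theorem fsA_end_eq (lines end_anchors : List String) (j : Nat) (hj : j ≤ lines.length) :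
    fsA_end lines end_anchors (lines.length : Int)
      (PySem.List.pyRange (j : Int) (lines.length : Int) 1)
    = (j : Int) + (fsAux (fun ln => end_anchors.any (fun e => PySem.Str.isIn e ln)) (lines.drop j) : Int) := by
  rcases eq_or_lt_of_le hj with heq | hlt
  · rw [heq, PySem.List.pyRange_one_eq_nil (by omega)]
    simp only [fsA_end, fsAux, List.drop_length, List.findIdx?_nil, List.length_nil,
      Nat.cast_zero, add_zero]
  · rw [PySem.List.pyRange_one_cons (by exact_mod_cast hlt)]
    have hget : PySem.List.pyGetD lines (j : Int) "" = lines[j] := by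
      rw [PySem.List.pyGetD_natCast]
      simp [hlt]
    have hdrop : lines.drop j = lines[j] :: lines.drop (j + 1) := List.drop_eq_getElem_cons hlt
    simp only [fsA_end, hget]
    by_cases hq : end_anchors.any (fun e => PySem.Str.isIn e lines[j]) = true
    · rw [if_pos hq, hdrop]
      simp only [fsAux, List.findIdx?_cons, hq, if_pos, Nat.cast_zero, add_zero]
    · rw [if_neg hq]
      have h1 : ((j : Int) + 1) = ((j + 1 : Nat) : Int) := by push_cast; ring
      rw [h1, fsA_end_eq lines end_anchors (j + 1) (by omega), hdrop]
      simp only [fsAux, List.findIdx?_cons, hq, if_neg, Bool.false_eq_true, not_false_iff]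
      cases h : (lines.drop (j + 1)).findIdx? (fun ln => end_anchors.any (fun e => PySem.Str.isIn e ln)) with
      | none => simp only [Option.map_none, List.length_cons]; push_cast; omega
      | some k => simp only [Option.map_some, List.length_cons]; push_cast; omega
termination_by lines.length - j

theorem take_fsAux (q : String → Bool) (xs : List String) :
    xs.take (fsAux q xs) = xs.takeWhile (fun ln => !q ln) := by
  induction xs with
  | nil => simp [fsAux]
  | cons x rest ih =>
    simp only [fsAux, List.findIdx?_cons, List.takeWhile_cons]
    by_cases hq : q x = true
    · rw [if_pos hq]; simp [hq]
    · rw [if_neg hq]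
      simp only [hq, Bool.not_false]
      cases h : rest.findIdx? q with
      | none =>
        simp only [Option.map_none, if_pos]
        rw [List.take_length]
        congr 1
        rw [← ih]; simp [fsAux, h]
      | some k =>
        simp only [Option.map_some]
        rw [List.take_succ_cons]
        congr 1
        rw [← ih]; simp [fsAux, h]

theorem fsB_collect (anchor : String) (end_anchors : List String) (xs : List String) (rest : List String) :
    fsB_loop anchor end_anchors (some xs) rest
    = some (xs ++ rest.takeWhile (fun ln => !end_anchors.any (fun e => PySem.Str.isIn e ln))) := by
  induction rest generalizing xs with
  | nil => simp [fsB_loop]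
  | cons ln tl ih =>
    simp only [fsB_loop, List.takeWhile_cons]
    by_cases hq : end_anchors.any (fun e => PySem.Str.isIn e ln) = true
    · rw [if_pos hq, hq]; simp
    · have hq' := eq_false_of_ne_true hq
      rw [if_neg hq, ih, hq']; simp

-- common characterization of both ports on the split lines
def fsRHS (p q : String → Bool) (lines : List String) : Option (List String) :=
  match lines.findIdx? p with
  | none => none
  | some s =>
    match lines.drop s with
    | [] => some []
    | x :: tl => some (x :: tl.takeWhile (fun ln => !q ln))

theorem fsB_char (anchor : String) (end_anchors : List String) (lines : List String) :
    fsB_loop anchor end_anchors none lines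
    = fsRHS (fun ln => PySem.Str.isIn anchor ln)
        (fun ln => end_anchors.any (fun e => PySem.Str.isIn e ln)) lines := by
  induction lines with
  | nil => simp [fsB_loop, fsRHS]
  | cons ln rest ih =>
    simp only [fsB_loop, fsRHS, List.findIdx?_cons]
    by_cases hp : PySem.Str.isIn anchor ln = true
    · rw [if_pos hp, if_pos hp, fsB_collect]
      simp only [List.drop_zero]
      simp
    · rw [if_neg hp, if_neg hp, ih]
      simp only [fsRHS]
      cases h : rest.findIdx? (fun ln => PySem.Str.isIn anchor ln) with
      | none => simp only [h, Option.map_none]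
      | some s => simp only [h, Option.map_some, List.drop_succ_cons]

theorem fsA_char (anchor : String) (end_anchors : List String) (lines : List String) :
    (match fsA_start anchor lines 0 with
     | none => none
     | some start =>
        some (PySem.List.slice lines (some (start : Int))
          (some (fsA_end lines end_anchors (lines.length : Int)
            (PySem.List.pyRange ((start : Int) + 1) (lines.length : Int) 1)))))
    = fsRHS (fun ln => PySem.Str.isIn anchor ln)
        (fun ln => end_anchors.any (fun e => PySem.Str.isIn e ln)) lines := by
  rw [fsA_start_eq]
  cases h : lines.findIdx? (fun ln => PySem.Str.isIn anchor ln) with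
  | none => simp only [fsRHS, h, Option.map_none]
  | some s =>
    have hs : s < lines.length := by
      have := List.findIdx?_eq_some_iff_findIdx_eq.mp h
      omega
    simp only [Option.map_some, Nat.zero_add, fsRHS, h]
    have h1 : ((s : Int) + 1) = ((s + 1 : Nat) : Int) := by push_cast; ring
    rw [h1, fsA_end_eq lines end_anchors (s + 1) (by omega)]
    set m := fsAux (fun ln => end_anchors.any (fun e => PySem.Str.isIn e ln)) (lines.drop (s + 1)) with hm
    have h2 : ((s + 1 : Nat) : Int) + (m : Int) = ((s + 1 + m : Nat) : Int) := by push_cast; ring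
    rw [h2, PySem.List.slice_natCast]
    have hdrop : lines.drop s = lines[s] :: lines.drop (s + 1) := List.drop_eq_getElem_cons hs
    rw [hdrop]
    have h3 : s + 1 + m - s = m + 1 := by omega
    rw [h3, List.take_succ_cons, hm, take_fsAux]

-- ===== VERDICT (by name: the statement is the Claim_ definition above) =====
theorem find_section_lines_spec : Claim_equal_find_section_lines := by
  intro text anchor end_anchors _
  unfold Spec_find_section_lines find_section_lines find_section_lines_alt
  rw [fsB_char]
  exact fsA_char anchor end_anchors (PySem.Str.splitlines text)
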